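-- pv_equiv track=rewrite | github.com/Porges/adventofcode | 2025/day02-02.py | invalid_ids
-- ===== SOURCE A (Python) =====
-- def top_nth(x, n):
--     x = str(x)
--     return int(x[0:len(x)//n] or '0')
--
-- def invalid_ids(start, end):
--     invalid = set()
--     for d in range(2, len(str(end)) + 1):
--         n = int(d * str(top_nth(start, d)))
--         while n <= end:
--             if n >= start: invalid.add(n)
--             n = int(d * str(top_nth(n, d) + 1))
--     return invalid
-- ===== SOURCE B (Python) =====
-- def invalid_ids(start, end):
--     invalid = set()
--     for d in range(2, len(str(end)) + 1):
--         p, shift = 0, 10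
--         mult = (shift ** d - 1) // (shift - 1)
--         while p * mult <= end:
--             if p * mult >= start:
--                 invalid.add(p * mult)
--             p += 1
--             if p == shift:
--                 shift *= 10
--                 mult = (shift ** d - 1) // (shift - 1)
--     return invalid
-- ===== Notes on version B (the rewrite author's own statement) =====
-- stated objective: faster
-- what changed: B enumerates the repeated prefix as an integer counter p and builds each candidate arithmetically as p*mult with mult the geometric sum (shift**d-1)//(shift-1), instead of A's reconstruction of the prefix from the current number by str()-slicing (top_nth) and re-parsing the d-fold string concatenation with int() on every step.
import Mathlib
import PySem

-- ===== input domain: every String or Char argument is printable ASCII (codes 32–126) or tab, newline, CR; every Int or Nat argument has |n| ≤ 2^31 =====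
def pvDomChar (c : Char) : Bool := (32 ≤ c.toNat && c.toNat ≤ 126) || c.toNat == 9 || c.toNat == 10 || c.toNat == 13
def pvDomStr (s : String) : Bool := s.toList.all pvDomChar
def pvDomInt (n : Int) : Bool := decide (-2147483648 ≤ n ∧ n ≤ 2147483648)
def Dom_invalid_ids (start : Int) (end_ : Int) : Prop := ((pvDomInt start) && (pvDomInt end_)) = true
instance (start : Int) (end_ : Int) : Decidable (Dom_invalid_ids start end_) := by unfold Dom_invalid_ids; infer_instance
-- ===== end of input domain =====

-- B changes the algorithm: an integer prefix counter with an arithmetic geometric-sum multiplier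
-- replaces A's per-step str()-slice/int()-reparse machinery (same candidates, no string work).

-- ===== PORT A =====
-- `int(s)`: hand replica, step for step, of Python's int() on strings (strip int-whitespace,
-- optional sign, digits with single '_' separators; none = ValueError). PySem.Int.ofChars?
-- computes exactly this, but its recursive helper is module-private, which blocks the symbolic
-- proofs below, so the replica is used; it is exact on every input.
def pvIntGo : List Char → Bool → ℕ → Option ℕ
  | [], afterDigit, acc => if afterDigit = true then some acc else none
  | c :: rest, afterDigit, acc =>
    if c.isDigit = true then pvIntGo rest true (acc * 10 + (c.toNat - '0'.toNat))
    else
      if c = '_' ∧ afterDigit = true then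
        match rest with
        | d :: _ => if d.isDigit = true then pvIntGo rest false acc else none
        | [] => none
      else none

def pvIntDigitsVal? : List Char → Option ℕ
  | [] => none
  | cs => pvIntGo cs false 0

def pvIntOfChars? (s : List Char) : Option Int :=
  have cs := (List.dropWhile PySem.Int.isIntSpace (List.dropWhile PySem.Int.isIntSpace s).reverse).reverse
  match cs with
  | '-' :: ds => Option.map (fun n => -n) (do let a ← pvIntDigitsVal? ds; pure ((a : Int)))
  | '+' :: ds => Option.map (fun n => n) (do let a ← pvIntDigitsVal? ds; pure ((a : Int)))
  | ds => Option.map (fun n => n) (do let a ← pvIntDigitsVal? ds; pure ((a : Int)))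

-- def top_nth(x, n): x = str(x); return int(x[0:len(x)//n] or '0')
def pv_top_nth (x : Int) (n : Int) : Option Int :=
  let xs := PySem.Int.toChars x
  let sl := PySem.List.slice xs (some 0) (some (PySem.Int.floordiv (xs.length : Int) n))
  pvIntOfChars? (if sl.isEmpty then ['0'] else sl)

-- `d * s` for a Python int d ≥ 0 and string s
def pvRepeatStr (d : Int) (s : List Char) : List Char := (List.replicate d.toNat s).flatten

-- the `while n <= end:` loop of A (fuel makes the recursion structural; the proofs show the
-- fuel passed at the call site is never exhausted on inputs satisfying Pre_)
def pvLoopA (start end_ d : Int) (inv : PySem.Set Int) (n : Int) : ℕ → PySem.Set Int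
  | 0 => inv
  | fuel+1 =>
    if n ≤ end_ then
      let inv' := if n ≥ start then PySem.Set.add inv n else inv
      -- int() raising in Python = the `none` (first) branch of `Option.elim` (unreachable under Pre_)
      (pv_top_nth n d).elim inv' (fun t =>
        (pvIntOfChars? (pvRepeatStr d (PySem.Int.toChars (t + 1)))).elim inv' (fun n' =>
          pvLoopA start end_ d inv' n' fuel))
    else inv

def invalid_ids (start : Int) (end_ : Int) : List Int :=
  (PySem.List.pyRange 2 (PySem.Str.len (PySem.Int.toStr end_) + 1) 1).foldl
    (fun inv d =>
      -- int() raising in Python = the `none` (first) branch of `Option.elim` (excluded by Pre_)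
      (pv_top_nth start d).elim inv (fun t =>
        (pvIntOfChars? (pvRepeatStr d (PySem.Int.toChars t))).elim inv (fun n0 =>
          pvLoopA start end_ d inv n0 (end_ + 2).toNat)))
    PySem.Set.empty

-- ===== PORT B =====
-- the `while p * mult <= end:` loop of B
def pvLoopB (start end_ d : Int) (inv : PySem.Set Int) (p shift mult : Int) : ℕ → PySem.Set Int
  | 0 => inv
  | fuel+1 =>
    if p * mult ≤ end_ then
      let inv' := if p * mult ≥ start then PySem.Set.add inv (p * mult) else inv
      let p' := p + 1
      if p' = shift then
        pvLoopB start end_ d inv' p' (shift * 10)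
          (PySem.Int.floordiv ((shift * 10) ^ d.toNat - 1) (shift * 10 - 1)) fuel
      else
        pvLoopB start end_ d inv' p' shift mult fuel
    else inv

def invalid_ids_alt (start : Int) (end_ : Int) : List Int :=
  (PySem.List.pyRange 2 (PySem.Str.len (PySem.Int.toStr end_) + 1) 1).foldl
    (fun inv d =>
      pvLoopB start end_ d inv 0 10 (PySem.Int.floordiv (10 ^ d.toNat - 1) (10 - 1)) (end_ + 2).toNat)
    PySem.Set.empty

-- ===== PRECONDITION & SPEC =====
-- Pre_ excludes exactly the inputs on which A raises: for start < 0 with len(str(end)) >= 2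
-- (i.e. end >= 10 or end < 0) the first loop iteration slices a '-' into int(), a ValueError.
def Pre_invalid_ids (start : Int) (end_ : Int) : Prop :=
  0 ≤ start ∨ (0 ≤ end_ ∧ end_ ≤ 9)
instance (start : Int) (end_ : Int) : Decidable (Pre_invalid_ids start end_) := by
  unfold Pre_invalid_ids; infer_instance

def pvWitness_invalid_ids : Int × Int := (1, 100)

def Spec_invalid_ids (start : Int) (end_ : Int) (out : List Int) : Prop :=
  out = invalid_ids_alt start end_
instance (start : Int) (end_ : Int) (out : List Int) : Decidable (Spec_invalid_ids start end_ out) := by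
  unfold Spec_invalid_ids; infer_instance

-- ===== CLAIM (what is proved, stated in full; the proofs are below) =====
def Claim_equal_invalid_ids : Prop :=
  ∀ (start : Int) (end_ : Int), Dom_invalid_ids start end_ → Pre_invalid_ids start end_ →
    Spec_invalid_ids start end_ (invalid_ids start end_)

-- ===== LEMMAS AND PROOFS =====

-- digit length of p as Python's len(str(p)) sees it (p : ℕ)
def pvDL (p : ℕ) : ℕ := if p = 0 then 1 else (Nat.digits 10 p).length

-- geometric sum: pvGeom d x = x^(d-1) + … + x + 1 (0 for d = 0)
def pvGeom : ℕ → ℕ → ℕ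
  | 0, _ => 0
  | d+1, x => pvGeom d x * x + 1

-- the d-fold decimal self-concatenation of p
def pvRep (d p : ℕ) : ℕ := p * pvGeom d (10 ^ pvDL p)

theorem pvRep_zero (d : ℕ) : pvRep d 0 = 0 := by simp [pvRep]

theorem pvRep_succ (d p : ℕ) : pvRep (d+1) p = pvRep d p * 10 ^ pvDL p + p := by
  simp [pvRep, pvGeom]; ring

theorem pvGeom_succ' (d x : ℕ) : pvGeom (d+1) x = x ^ d + pvGeom d x := by
  induction d with
  | zero => simp [pvGeom]
  | succ d ih =>
    calc pvGeom (d+2) x = pvGeom (d+1) x * x + 1 := rfl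
    _ = (x ^ d + pvGeom d x) * x + 1 := by rw [ih]
    _ = x ^ (d+1) + (pvGeom d x * x + 1) := by ring
    _ = x ^ (d+1) + pvGeom (d+1) x := rfl

theorem pvRep_succ' (d p : ℕ) : pvRep (d+1) p = p * 10 ^ (d * pvDL p) + pvRep d p := by
  simp [pvRep, pvGeom_succ', Nat.pow_mul]
  ring

theorem pvGeom_pos {d x : ℕ} (hd : 1 ≤ d) : 1 ≤ pvGeom d x := by
  cases d with
  | zero => omega
  | succ d => simp [pvGeom]

-- ### digits-side characterisation

theorem pvDL_pos (p : ℕ) : 1 ≤ pvDL p := by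
  unfold pvDL; split
  · omega
  · have h0 : Nat.digits 10 p ≠ [] := Nat.digits_ne_nil_iff_ne_zero.mpr ‹p ≠ 0›
    cases h : Nat.digits 10 p with
    | nil => exact absurd h h0
    | cons a l => simp [h]

theorem pvDL_lt (p : ℕ) : p < 10 ^ pvDL p := by
  unfold pvDL; split
  · omega
  · exact Nat.lt_base_pow_length_digits (by norm_num)

theorem pvDL_le {k : ℕ} {p : ℕ} (hk : 1 ≤ k) (h : p < 10 ^ k) : pvDL p ≤ k := by
  unfold pvDL; split
  · omega
  · by_contra hlt
    push_neg at hlt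
    have h1 : 10 ^ (Nat.digits 10 p).length ≤ 10 * p :=
      Nat.base_pow_length_digits_le 10 p (by norm_num) ‹p ≠ 0›
    have h2 : 10 ^ (k+1) ≤ 10 ^ (Nat.digits 10 p).length := Nat.pow_le_pow_right (by norm_num) hlt
    have h3 : (10:ℕ) ^ (k+1) = 10 * 10 ^ k := by ring
    omega

theorem pvDL_digits {p : ℕ} (hp : 1 ≤ p) : (Nat.digits 10 p).length = pvDL p := by
  unfold pvDL; split
  · omega
  · rfl

-- digits of the self-concatenation: d copies of `digits p` (little-endian)
theorem pvRep_digits {p : ℕ} (hp : 1 ≤ p) (d : ℕ) :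
    Nat.digits 10 (pvRep d p) = (List.replicate d (Nat.digits 10 p)).flatten := by
  induction d with
  | zero => simp [pvRep, pvGeom]
  | succ d ih =>
    have h := @Nat.digits_append_digits 10 (pvRep d p) p (by norm_num)
    rw [pvDL_digits hp] at h
    have : p + 10 ^ pvDL p * pvRep d p = pvRep (d+1) p := by rw [pvRep_succ]; ring
    rw [this] at h
    rw [← h, ih, List.replicate_succ, List.flatten_cons]

theorem pvRep_digits_len {p : ℕ} (hp : 1 ≤ p) (d : ℕ) :
    (Nat.digits 10 (pvRep d p)).length = d * pvDL p := by
  rw [pvRep_digits hp, List.length_flatten]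
  simp [pvDL_digits hp, Nat.mul_comm]

theorem pvRep_pos {p : ℕ} (hp : 1 ≤ p) {d : ℕ} (hd : 1 ≤ d) : 1 ≤ pvRep d p := by
  have := pvGeom_pos (x := 10 ^ pvDL p) hd
  calc 1 ≤ p * 1 := by omega
  _ ≤ pvRep d p := Nat.mul_le_mul_left p this

theorem pvRep_lt_pow {p : ℕ} (hp : 1 ≤ p) {d : ℕ} : pvRep d p < 10 ^ (d * pvDL p) := by
  have := @Nat.lt_base_pow_length_digits 10 (pvRep d p) (by norm_num)
  rwa [pvRep_digits_len hp d] at this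

theorem pvRep_ge_pow {p : ℕ} (hp : 1 ≤ p) {d : ℕ} (hd : 1 ≤ d) :
    10 ^ (d * pvDL p) ≤ 10 * pvRep d p := by
  have h := Nat.base_pow_length_digits_le 10 (pvRep d p) (by norm_num)
    (Nat.one_le_iff_ne_zero.mp (pvRep_pos hp hd))
  rwa [pvRep_digits_len hp d] at h

-- strict monotonicity of pvRep d in p (d ≥ 1)
theorem pvRep_strictMono {d : ℕ} (hd : 1 ≤ d) {p q : ℕ} (h : p < q) :
    pvRep d p < pvRep d q := by
  have hq : 1 ≤ q := by omega
  rcases Nat.lt_or_ge p 1 with hp | hp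
  · -- p = 0
    have : p = 0 := by omega
    subst this
    rw [pvRep_zero]
    exact pvRep_pos hq hd
  · rcases Nat.lt_or_ge (pvDL p) (pvDL q) with hL | hL
    · -- strictly fewer digits: rep p < 10^(d·DLp) ≤ 10^(d·DLq - 1) < rep q · 10 / 10 …
      have h1 : pvRep d p < 10 ^ (d * pvDL p) := pvRep_lt_pow hp
      have h2 : 10 ^ (d * pvDL q) ≤ 10 * pvRep d q := pvRep_ge_pow hq hd
      have h3 : d * pvDL p + 1 ≤ d * pvDL q := by
        have := pvDL_pos p; nlinarith
      have h4 : 10 ^ (d * pvDL p + 1) ≤ 10 ^ (d * pvDL q) := Nat.pow_le_pow_right (by norm_num) h3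
      have h5 : (10:ℕ) ^ (d * pvDL p + 1) = 10 * 10 ^ (d * pvDL p) := by ring
      omega
    · -- pvDL q ≤ pvDL p; but p < q gives pvDL p ≤ pvDL q, so equal
      have hL' : pvDL p ≤ pvDL q := pvDL_le (pvDL_pos q) (lt_of_lt_of_le h (le_of_lt (pvDL_lt q)))
      have hEq : pvDL p = pvDL q := le_antisymm hL' hL
      unfold pvRep
      rw [hEq]
      have := pvGeom_pos (x := 10 ^ pvDL q) hd
      exact Nat.mul_lt_mul_of_lt_of_le h (le_refl _) (by omega)

theorem pvRep_mono {d : ℕ} (hd : 1 ≤ d) {p q : ℕ} (h : p ≤ q) : pvRep d p ≤ pvRep d q := by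
  rcases Nat.eq_or_lt_of_le h with rfl | h
  · exact le_refl _
  · exact le_of_lt (pvRep_strictMono hd h)

-- digit-length increment
theorem pvDL_succ (p : ℕ) :
    pvDL (p+1) = if p + 1 = 10 ^ pvDL p then pvDL p + 1 else pvDL p := by
  split
  · -- p+1 = 10^DL p
    next heq =>
    have h1 : p + 1 < 10 ^ (pvDL p + 1) := by
      have : (10:ℕ) ^ (pvDL p + 1) = 10 * 10 ^ pvDL p := by ring
      have h0 : 1 ≤ 10 ^ pvDL p := Nat.one_le_iff_ne_zero.mpr (by positivity)
      omega
    have h2 : pvDL (p+1) ≤ pvDL p + 1 := pvDL_le (by omega) h1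
    have h3 : 10 ^ pvDL p ≤ p + 1 := le_of_eq heq.symm
    -- and p+1 ≥ 10^DL p forces DL (p+1) ≥ DL p + 1
    by_contra hne
    have h4 : pvDL (p+1) ≤ pvDL p := by omega
    have h5 : p + 1 < 10 ^ pvDL p :=
      lt_of_lt_of_le (pvDL_lt (p+1)) (Nat.pow_le_pow_right (by norm_num) h4)
    omega
  · next hne =>
    have h1 : p + 1 < 10 ^ pvDL p := by
      have := pvDL_lt p; omega
    have h2 : pvDL (p+1) ≤ pvDL p := pvDL_le (pvDL_pos p) h1
    have h3 : pvDL p ≤ pvDL (p+1) := pvDL_le (pvDL_pos (p+1)) (by have := pvDL_lt (p+1); omega)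
    omega

-- ### str()-side: Nat.toDigits bridge

theorem pv_toDigitsCore_eq (f : ℕ) :
    ∀ n l, n < f →
      Nat.toDigitsCore 10 f n l
        = if n = 0 then '0' :: l else ((Nat.digits 10 n).map Nat.digitChar).reverse ++ l := by
  induction f with
  | zero => intro n l h; omega
  | succ f ih =>
    intro n l h
    show (let d := Nat.digitChar (n % 10); let n' := n / 10;
          if n' = 0 then d :: l else Nat.toDigitsCore 10 f n' (d :: l)) = _
    simp only []
    by_cases h0 : n / 10 = 0
    · rw [if_pos h0]
      by_cases hn : n = 0
      · subst hn; simp; decide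
      · rw [if_neg hn]
        rw [Nat.digits_def' (by norm_num : 1 < 10) (Nat.pos_of_ne_zero hn), h0]
        simp
    · rw [if_neg h0]
      have hn : n ≠ 0 := by intro hh; subst hh; simp at h0
      have hlt : n / 10 < f := by
        have := Nat.div_lt_self (Nat.pos_of_ne_zero hn) (by norm_num : 1 < 10)
        omega
      rw [ih (n / 10) _ hlt, if_neg h0, if_neg hn]
      rw [Nat.digits_def' (by norm_num : 1 < 10) (Nat.pos_of_ne_zero hn)]
      simp

theorem pv_toDigits_eq (n : ℕ) :
    Nat.toDigits 10 n = if n = 0 then ['0'] else ((Nat.digits 10 n).map Nat.digitChar).reverse := by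
  have := pv_toDigitsCore_eq (n+1) n [] (Nat.lt_succ_self n)
  unfold Nat.toDigits
  rw [this]
  split <;> simp

theorem pv_toChars_natCast (n : ℕ) :
    PySem.Int.toChars (n : Int) = Nat.toDigits 10 n := by
  unfold PySem.Int.toChars
  rw [if_neg (by omega)]
  norm_num

theorem pv_digitChar_isDigit {d : ℕ} (h : d < 10) : (Nat.digitChar d).isDigit = true := by
  interval_cases d <;> decide

theorem pv_digitChar_toNat {d : ℕ} (h : d < 10) : (Nat.digitChar d).toNat - '0'.toNat = d := by
  interval_cases d <;> decide

theorem pv_digit_not_space {c : Char} (h : c.isDigit = true) : PySem.Int.isIntSpace c = false := by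
  by_contra h'
  have h'' : PySem.Int.isIntSpace c = true := by
    cases hb : PySem.Int.isIntSpace c
    · exact absurd hb h'
    · rfl
  unfold PySem.Int.isIntSpace at h''
  simp only [Bool.or_eq_true, decide_eq_true_eq] at h''
  rcases h'' with ((((hc | hc) | hc) | hc) | hc) | hc <;> (subst hc; exact absurd h (by decide))

theorem pv_dropWhile_digits (l : List Char) (h : ∀ c ∈ l, c.isDigit) :
    List.dropWhile PySem.Int.isIntSpace l = l := by
  cases l with
  | nil => rfl
  | cons c t =>
    rw [List.dropWhile_cons, if_neg]
    rw [pv_digit_not_space (h c List.mem_cons_self)]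
    simp

-- ### parse-side: the replica on digit strings

def pvVal (acc : ℕ) (cs : List Char) : ℕ := cs.foldl (fun a c => a * 10 + (c.toNat - '0'.toNat)) acc

theorem pvIntGo_digits (cs : List Char) (h : ∀ c ∈ cs, c.isDigit) (b : Bool) (acc : ℕ) :
    pvIntGo cs b acc = if cs = [] then (if b then some acc else none) else some (pvVal acc cs) := by
  induction cs generalizing b acc with
  | nil => simp [pvIntGo]
  | cons c rest ih =>
    have hc : c.isDigit := h c List.mem_cons_self
    simp only [pvIntGo, hc, if_true, List.cons_ne_nil, if_false]
    rw [ih (fun x hx => h x (List.mem_cons_of_mem c hx)) true _]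
    split
    · next hrest => subst hrest; simp [pvVal]
    · simp [pvVal]

theorem pvIntOfChars?_digits (cs : List Char) (hne : cs ≠ []) (h : ∀ c ∈ cs, c.isDigit) :
    pvIntOfChars? cs = some ((pvVal 0 cs : ℕ) : Int) := by
  cases cs with
  | nil => exact absurd rfl hne
  | cons c t =>
    have hstrip :
        (List.dropWhile PySem.Int.isIntSpace
          (List.dropWhile PySem.Int.isIntSpace (c :: t)).reverse).reverse = c :: t := by
      rw [pv_dropWhile_digits _ h,
        pv_dropWhile_digits _ (fun x hx => h x (List.mem_reverse.mp hx)), List.reverse_reverse]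
    unfold pvIntOfChars?
    simp only [letFun]
    rw [hstrip]
    split
    · next ds heq =>
      have hc : c = '-' := by injection heq
      exact absurd (h c List.mem_cons_self) (by rw [hc]; decide)
    · next ds heq =>
      have hc : c = '+' := by injection heq
      exact absurd (h c List.mem_cons_self) (by rw [hc]; decide)
    · have hdv : pvIntDigitsVal? (c :: t) = pvIntGo (c :: t) false 0 := rfl
      rw [hdv, pvIntGo_digits _ h false 0, if_neg (List.cons_ne_nil c t)]
      rfl

-- ### pvVal of digit strings

theorem pvVal_append (acc : ℕ) (xs ys : List Char) :
    pvVal acc (xs ++ ys) = pvVal (pvVal acc xs) ys := by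
  simp [pvVal, List.foldl_append]

theorem pvVal_revmap (l : List ℕ) (h : ∀ d ∈ l, d < 10) (acc : ℕ) :
    pvVal acc ((l.map Nat.digitChar).reverse) = acc * 10 ^ l.length + Nat.ofDigits 10 l := by
  induction l generalizing acc with
  | nil => simp [pvVal, Nat.ofDigits]
  | cons d t ih =>
    rw [List.map_cons, List.reverse_cons, pvVal_append,
      ih (fun x hx => h x (List.mem_cons_of_mem d hx)) acc]
    have h1 : pvVal (acc * 10 ^ t.length + Nat.ofDigits 10 t) [Nat.digitChar d]
        = (acc * 10 ^ t.length + Nat.ofDigits 10 t) * 10 + d := by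
      show (acc * 10 ^ t.length + Nat.ofDigits 10 t) * 10 + ((Nat.digitChar d).toNat - '0'.toNat) = _
      rw [pv_digitChar_toNat (h d List.mem_cons_self)]
    rw [h1, Nat.ofDigits_cons]
    simp [pow_succ]
    ring

theorem pvVal_toDigits (acc n : ℕ) :
    pvVal acc (Nat.toDigits 10 n) = acc * 10 ^ (pvDL n) + n := by
  rw [pv_toDigits_eq]
  by_cases hn : n = 0
  · subst hn
    show acc * 10 + ('0'.toNat - '0'.toNat) = acc * 10 ^ pvDL 0 + 0
    simp [pvDL]
  · rw [if_neg hn, pvVal_revmap _ (fun d hd => Nat.digits_lt_base (by norm_num) hd) acc,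
      Nat.ofDigits_digits, pvDL_digits (Nat.one_le_iff_ne_zero.mpr hn)]

theorem pv_toDigits_all_digits (n : ℕ) : ∀ c ∈ Nat.toDigits 10 n, c.isDigit := by
  rw [pv_toDigits_eq]
  split
  · intro c hc
    simp at hc
    subst hc
    decide
  · intro c hc
    rw [List.mem_reverse, List.mem_map] at hc
    obtain ⟨d, hd, rfl⟩ := hc
    exact pv_digitChar_isDigit (Nat.digits_lt_base (by norm_num) hd)

theorem pv_toDigits_length (n : ℕ) : (Nat.toDigits 10 n).length = pvDL n := by
  rw [pv_toDigits_eq]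
  by_cases hn : n = 0
  · subst hn; simp [pvDL]
  · rw [if_neg hn]
    simp [pvDL, hn]

theorem pv_toDigits_ne_nil (n : ℕ) : Nat.toDigits 10 n ≠ [] := by
  intro h
  have h1 := pv_toDigits_length n
  have h2 := pvDL_pos n
  rw [h] at h1
  simp at h1
  omega

-- value of the d-fold repetition string
theorem pvVal_repeat (d n : ℕ) (acc : ℕ) :
    pvVal acc ((List.replicate d (Nat.toDigits 10 n)).flatten)
      = acc * 10 ^ (d * pvDL n) + pvRep d n := by
  induction d generalizing acc with
  | zero => simp [pvVal, pvRep, pvGeom]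
  | succ d ih =>
    rw [List.replicate_succ, List.flatten_cons, pvVal_append, pvVal_toDigits, ih, pvRep_succ']
    rw [show (d+1) * pvDL n = pvDL n + d * pvDL n by ring, pow_add]
    ring

-- ===== port-level lemmas =====

theorem pvParse_repeat (dn : ℕ) (hd : 2 ≤ dn) (p : ℕ) :
    pvIntOfChars? (pvRepeatStr (dn : Int) (PySem.Int.toChars (p : Int)))
      = some ((pvRep dn p : ℕ) : Int) := by
  rw [pv_toChars_natCast]
  unfold pvRepeatStr
  have htoNat : ((dn : Int)).toNat = dn := by simp
  rw [htoNat]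
  rw [pvIntOfChars?_digits _ ?hne ?hdig]
  · rw [pvVal_repeat]
    simp
  case hne =>
    have : dn = (dn - 1) + 1 := by omega
    rw [this, List.replicate_succ, List.flatten_cons]
    simp only [ne_eq, List.append_eq_nil_iff, not_and]
    intro h
    exact absurd h (pv_toDigits_ne_nil p)
  case hdig =>
    intro c hc
    rw [List.mem_flatten] at hc
    obtain ⟨l, hl, hcl⟩ := hc
    rw [List.mem_replicate] at hl
    rw [hl.2] at hcl
    exact pv_toDigits_all_digits p c hcl

-- first ⌊m/d⌋ characters of str(s): the integer prefix
def pvP0 (s dn : ℕ) : ℕ := s / 10 ^ (pvDL s - pvDL s / dn)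

theorem pv_drop_digits (j : ℕ) (n : ℕ) :
    (Nat.digits 10 n).drop j = Nat.digits 10 (n / 10 ^ j) := by
  induction j generalizing n with
  | zero => simp
  | succ j ih =>
    rcases Nat.eq_zero_or_pos n with rfl | hn
    · simp [Nat.zero_div]
    · rw [Nat.digits_def' (by norm_num : 1 < 10) hn]
      rw [List.drop_succ_cons, ih]
      congr 1
      rw [Nat.div_div_eq_div_mul]
      ring_nf

theorem pvDL_ge {s : ℕ} (hs : 1 ≤ s) : 10 ^ (pvDL s - 1) ≤ s := by
  have h1 := Nat.base_pow_length_digits_le 10 s (by norm_num) (by omega)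
  have h2 := pvDL_digits hs
  have h3 := pvDL_pos s
  have h4 : (10:ℕ) ^ pvDL s = 10 * 10 ^ (pvDL s - 1) := by
    rw [← pow_succ']
    congr 1
    omega
  rw [h2, h4] at h1
  omega

theorem pv_top_nth_eval (s : ℕ) (dn : ℕ) (hd : 2 ≤ dn) :
    pv_top_nth (s : Int) (dn : Int) = some ((pvP0 s dn : ℕ) : Int) := by
  unfold pv_top_nth
  simp only [letFun]
  rw [pv_toChars_natCast]
  have hlen : ((Nat.toDigits 10 s).length : Int) = ((pvDL s : ℕ) : Int) := by
    rw [pv_toDigits_length]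
  rw [hlen, PySem.Int.floordiv_natCast]
  rw [PySem.List.slice_zero_start, PySem.List.slice_to _ (by positivity)]
  have htn : ((pvDL s / dn : ℕ) : Int).toNat = pvDL s / dn := Int.toNat_natCast _
  rw [htn]
  by_cases hk0 : pvDL s / dn = 0
  · rw [hk0, List.take_zero]
    have hp0 : pvP0 s dn = 0 := by
      unfold pvP0
      rw [hk0, Nat.sub_zero]
      exact Nat.div_eq_of_lt (pvDL_lt s)
    rw [hp0]
    simp only [List.isEmpty_nil, if_true]
    decide
  · have hs1 : s ≠ 0 := by
      intro h0
      subst h0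
      have : pvDL 0 = 1 := by simp [pvDL]
      rw [this] at hk0
      exact hk0 (Nat.div_eq_of_lt (by omega))
    have hs1' : 1 ≤ s := Nat.pos_of_ne_zero hs1
    have hm := pvDL_digits hs1'
    rw [pv_toDigits_eq, if_neg hs1, List.take_reverse]
    have hlen2 : ((Nat.digits 10 s).map Nat.digitChar).length = pvDL s := by
      rw [List.length_map, hm]
    rw [hlen2]
    have hcomm : ((Nat.digits 10 s).map Nat.digitChar).drop (pvDL s - pvDL s / dn)
        = ((Nat.digits 10 s).drop (pvDL s - pvDL s / dn)).map Nat.digitChar := by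
      first
      | rw [List.map_drop]
      | rw [← List.map_drop]
    rw [hcomm, pv_drop_digits]
    have hq1 : 1 ≤ s / 10 ^ (pvDL s - pvDL s / dn) := by
      have h10 : (10:ℕ) ^ (pvDL s - pvDL s / dn) ≤ 10 ^ (pvDL s - 1) :=
        Nat.pow_le_pow_right (by norm_num) (by omega)
      exact Nat.div_pos (le_trans h10 (pvDL_ge hs1')) (by positivity)
    have hqne : s / 10 ^ (pvDL s - pvDL s / dn) ≠ 0 := by omega
    have hrev : ((Nat.digits 10 (s / 10 ^ (pvDL s - pvDL s / dn))).map Nat.digitChar).reverse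
        = Nat.toDigits 10 (s / 10 ^ (pvDL s - pvDL s / dn)) := by
      rw [pv_toDigits_eq, if_neg hqne]
    rw [hrev]
    have hemp : (Nat.toDigits 10 (s / 10 ^ (pvDL s - pvDL s / dn))).isEmpty = false := by
      rw [List.isEmpty_eq_false_iff]
      exact pv_toDigits_ne_nil _
    rw [hemp]
    simp only [Bool.false_eq_true, if_false]
    rw [pvIntOfChars?_digits _ (pv_toDigits_ne_nil _) (pv_toDigits_all_digits _)]
    rw [pvVal_toDigits]
    unfold pvP0
    simp

-- all prefixes below pvP0 give numbers below s
theorem pvP0_lt_start {s dn : ℕ} (hs : 1 ≤ s) (hd : 2 ≤ dn) {p : ℕ} (h : p < pvP0 s dn) :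
    pvRep dn p < s := by
  unfold pvP0 at h
  have hm1 : pvDL s / dn ≤ pvDL s := Nat.div_le_self _ _
  by_cases hk0 : pvDL s / dn = 0
  · rw [hk0, Nat.sub_zero, Nat.div_eq_of_lt (pvDL_lt s)] at h
    omega
  · have hk1 : 1 ≤ pvDL s / dn := Nat.one_le_iff_ne_zero.mpr hk0
    have hdk : dn * (pvDL s / dn) ≤ pvDL s := by
      calc dn * (pvDL s / dn) = (pvDL s / dn) * dn := by ring
      _ ≤ pvDL s := Nat.div_mul_le_self (pvDL s) dn
    rcases Nat.eq_zero_or_pos p with rfl | hp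
    · rw [pvRep_zero]; omega
    · have hq0lt : s / 10 ^ (pvDL s - pvDL s / dn) < 10 ^ (pvDL s / dn) := by
        rw [Nat.div_lt_iff_lt_mul (by positivity)]
        calc s < 10 ^ pvDL s := pvDL_lt s
        _ = 10 ^ (pvDL s / dn) * 10 ^ (pvDL s - pvDL s / dn) := by
              rw [← pow_add]; congr 1; omega
      have hpk : pvDL p ≤ pvDL s / dn := pvDL_le hk1 (lt_trans h hq0lt)
      rcases Nat.lt_or_ge (pvDL p) (pvDL s / dn) with hLlt | hLge
      · have h1 : pvRep dn p < 10 ^ (dn * pvDL p) := pvRep_lt_pow hp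
        have h2 : dn * pvDL p ≤ pvDL s - 1 := by
          have : dn * pvDL p + dn ≤ dn * (pvDL s / dn) := by nlinarith
          omega
        have h3 : (10:ℕ) ^ (dn * pvDL p) ≤ 10 ^ (pvDL s - 1) :=
          Nat.pow_le_pow_right (by norm_num) h2
        have h4 := pvDL_ge hs
        omega
      · have hLeq : pvDL p = pvDL s / dn := by omega
        have hsplit : pvRep dn p = p * 10 ^ ((dn - 1) * pvDL p) + pvRep (dn - 1) p := by
          have := pvRep_succ' (dn - 1) p
          rw [show dn - 1 + 1 = dn by omega] at this
          exact this
        have hsmall : pvRep (dn - 1) p < 10 ^ ((dn - 1) * pvDL p) := pvRep_lt_pow hp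
        have hbound : pvRep dn p < (p + 1) * 10 ^ ((dn - 1) * pvDL p) := by
          rw [hsplit]; nlinarith [pow_pos (by norm_num : (0:ℕ) < 10) ((dn - 1) * pvDL p)]
        have hple : p + 1 ≤ s / 10 ^ (pvDL s - pvDL s / dn) := by omega
        have hexp : (dn - 1) * pvDL p ≤ pvDL s - pvDL s / dn := by
          rw [hLeq, Nat.sub_one_mul]; omega
        have hstep : (p + 1) * 10 ^ ((dn - 1) * pvDL p)
            ≤ (s / 10 ^ (pvDL s - pvDL s / dn)) * 10 ^ (pvDL s - pvDL s / dn) :=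
          Nat.mul_le_mul hple (Nat.pow_le_pow_right (by norm_num) hexp)
        have hdivmul : (s / 10 ^ (pvDL s - pvDL s / dn)) * 10 ^ (pvDL s - pvDL s / dn) ≤ s :=
          Nat.div_mul_le_self s _
        omega

-- pvP0 of a repetition recovers the prefix
theorem pvP0_rep (dn : ℕ) (hd : 2 ≤ dn) (p : ℕ) : pvP0 (pvRep dn p) dn = p := by
  rcases Nat.eq_zero_or_pos p with rfl | hp
  · rw [pvRep_zero]
    unfold pvP0
    exact Nat.zero_div _
  · have hrep1 : 1 ≤ pvRep dn p := pvRep_pos hp (by omega)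
    have hmlen : pvDL (pvRep dn p) = dn * pvDL p := by
      rw [← pvDL_digits hrep1, pvRep_digits_len hp]
    unfold pvP0
    rw [hmlen, Nat.mul_div_cancel_left _ (by omega : 0 < dn)]
    have hexp : dn * pvDL p - pvDL p = (dn - 1) * pvDL p := by
      have : dn * pvDL p = (dn - 1) * pvDL p + pvDL p := by
        have h1 : dn = (dn - 1) + 1 := by omega
        calc dn * pvDL p = ((dn - 1) + 1) * pvDL p := by rw [← h1]
        _ = (dn - 1) * pvDL p + pvDL p := by ring
      omega
    rw [hexp]
    have hsplit : pvRep dn p = p * 10 ^ ((dn - 1) * pvDL p) + pvRep (dn - 1) p := by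
      have := pvRep_succ' (dn - 1) p
      rw [show dn - 1 + 1 = dn by omega] at this
      exact this
    have hsmall : pvRep (dn - 1) p < 10 ^ ((dn - 1) * pvDL p) := pvRep_lt_pow hp
    rw [hsplit]
    rw [Nat.add_comm, Nat.add_mul_div_right _ _ (by positivity : 0 < 10 ^ ((dn - 1) * pvDL p))]
    rw [Nat.div_eq_of_lt hsmall]
    omega

-- ===== the ideal per-d add list =====

def pvIdeal (start end_ : Int) (dn : ℕ) (hd : 2 ≤ dn) (p : ℕ) : List Int :=
  if h : ((pvRep dn p : ℕ) : Int) ≤ end_ then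
    (if start ≤ ((pvRep dn p : ℕ) : Int) then [((pvRep dn p : ℕ) : Int)] else []) ++
      pvIdeal start end_ dn hd (p+1)
  else []
termination_by (end_ + 1 - ((pvRep dn p : ℕ) : Int)).toNat
decreasing_by
  have h1 : pvRep dn p < pvRep dn (p+1) := pvRep_strictMono (by omega) (Nat.lt_succ_self p)
  have h2 : ((pvRep dn p : ℕ) : Int) < ((pvRep dn (p+1) : ℕ) : Int) := by exact_mod_cast h1
  omega

theorem pvIdeal_nil {start end_ : Int} {dn : ℕ} {hd : 2 ≤ dn} {p : ℕ}
    (h : end_ < ((pvRep dn p : ℕ) : Int)) : pvIdeal start end_ dn hd p = [] := by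
  rw [pvIdeal.eq_def]
  rw [dif_neg (by omega)]

-- skipping the sub-start prefixes changes nothing
theorem pvIdeal_skip {start end_ : Int} {dn : ℕ} {hd : 2 ≤ dn} {p : ℕ}
    (h : ∀ q < p, ((pvRep dn q : ℕ) : Int) < start) :
    pvIdeal start end_ dn hd 0 = pvIdeal start end_ dn hd p := by
  induction p with
  | zero => rfl
  | succ p ih =>
    rw [ih (fun q hq => h q (by omega))]
    rw [pvIdeal.eq_def]
    split
    · rw [if_neg (by have := h p (Nat.lt_succ_self p); omega)]
      simp
    · next hgt =>
      push_neg at hgt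
      refine (pvIdeal_nil ?_).symm
      have : pvRep dn p ≤ pvRep dn (p+1) := pvRep_mono (by omega) (by omega)
      push_cast
      push_cast at hgt
      omega

def pvAddAll (inv : PySem.Set Int) (l : List Int) : PySem.Set Int :=
  l.foldl PySem.Set.add inv

theorem pvAddAll_append (inv : PySem.Set Int) (l1 l2 : List Int) :
    pvAddAll inv (l1 ++ l2) = pvAddAll (pvAddAll inv l1) l2 := by
  simp [pvAddAll, List.foldl_append]

-- ===== loop A equals the ideal list =====

theorem pvLoopA_ideal (start end_ : Int) (dn : ℕ) (hd : 2 ≤ dn) :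
    ∀ (fuel : ℕ) (p : ℕ) (inv : PySem.Set Int),
      ((end_ + 1 - ((pvRep dn p : ℕ) : Int)).toNat < fuel ∨ end_ < ((pvRep dn p : ℕ) : Int)) →
      pvLoopA start end_ (dn : Int) inv ((pvRep dn p : ℕ) : Int) fuel
        = pvAddAll inv (pvIdeal start end_ dn hd p) := by
  intro fuel
  induction fuel with
  | zero =>
    intro p inv h
    rcases h with h | h
    · omega
    · rw [pvIdeal_nil h]
      rfl
  | succ fuel ih =>
    intro p inv h
    simp only [pvLoopA]
    rw [pvIdeal.eq_def]
    split
    · next hle =>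
      rw [pv_top_nth_eval _ _ hd, pvP0_rep dn hd p]
      simp only [Option.elim_some]
      have hcast : ((p : ℕ) : Int) + 1 = ((p + 1 : ℕ) : Int) := by push_cast; ring
      rw [hcast, pvParse_repeat dn hd (p+1)]
      simp only [Option.elim_some]
      have hnext : pvRep dn p < pvRep dn (p+1) := pvRep_strictMono (by omega) (Nat.lt_succ_self p)
      rw [ih (p+1) _ ?_]
      · rw [pvAddAll_append]
        congr 1
        by_cases hst : start ≤ ((pvRep dn p : ℕ) : Int)
        · rw [if_pos (by omega), if_pos hst]; rfl
        · rw [if_neg (by omega), if_neg hst]; rfl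
      · rcases Int.lt_or_le end_ ((pvRep dn (p+1) : ℕ) : Int) with h2 | h2
        · right; exact h2
        · left
          rcases h with h | h
          · omega
          · omega
    · next hle =>
      rfl

-- ===== loop B equals the ideal list =====

theorem pv_floordiv_geom (dn x : ℕ) (hx : 2 ≤ x) :
    PySem.Int.floordiv ((x:Int) ^ dn - 1) ((x:Int) - 1) = ((pvGeom dn x : ℕ) : Int) := by
  have hx2 : (2:Int) ≤ (x:Int) := by exact_mod_cast hx
  have key : ((x:Int) - 1) * ((pvGeom dn x : ℕ) : Int) = (x:Int) ^ dn - 1 := by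
    induction dn with
    | zero => simp [pvGeom]
    | succ d ih =>
      have hcast : ((pvGeom (d+1) x : ℕ) : Int) = ((pvGeom d x : ℕ) : Int) * (x:Int) + 1 := by
        simp only [pvGeom]; push_cast; ring
      rw [hcast]
      calc ((x:Int) - 1) * (((pvGeom d x : ℕ) : Int) * (x:Int) + 1)
          = (((x:Int) - 1) * ((pvGeom d x : ℕ) : Int)) * (x:Int) + ((x:Int) - 1) := by ring
        _ = ((x:Int) ^ d - 1) * (x:Int) + ((x:Int) - 1) := by rw [ih]
        _ = (x:Int) ^ (d+1) - 1 := by ring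
  rw [← key, PySem.Int.floordiv_eq_ediv_of_pos (by omega), Int.mul_ediv_cancel_left _ (by omega)]

theorem pvLoopB_ideal (start end_ : Int) (dn : ℕ) (hd : 2 ≤ dn) :
    ∀ (fuel : ℕ) (p : ℕ) (inv : PySem.Set Int),
      ((end_ + 1 - ((pvRep dn p : ℕ) : Int)).toNat < fuel ∨ end_ < ((pvRep dn p : ℕ) : Int)) →
      pvLoopB start end_ (dn : Int) inv ((p : ℕ) : Int)
          (((10 : ℕ) ^ pvDL p : ℕ) : Int) ((pvGeom dn (10 ^ pvDL p) : ℕ) : Int) fuel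
        = pvAddAll inv (pvIdeal start end_ dn hd p) := by
  intro fuel
  induction fuel with
  | zero =>
    intro p inv h
    rcases h with h | h
    · omega
    · rw [pvIdeal_nil h]
      rfl
  | succ fuel ih =>
    intro p inv h
    have hpm : ((p : ℕ) : Int) * ((pvGeom dn (10 ^ pvDL p) : ℕ) : Int) = ((pvRep dn p : ℕ) : Int) := by
      unfold pvRep
      push_cast
      ring
    simp only [pvLoopB, Int.toNat_natCast]
    rw [hpm, pvIdeal.eq_def]
    split
    · next hle =>
      have hnext : pvRep dn p < pvRep dn (p+1) := pvRep_strictMono (by omega) (Nat.lt_succ_self p)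
      have hcond : (end_ + 1 - ((pvRep dn (p+1) : ℕ) : Int)).toNat < fuel ∨
          end_ < ((pvRep dn (p+1) : ℕ) : Int) := by
        rcases Int.lt_or_le end_ ((pvRep dn (p+1) : ℕ) : Int) with h2 | h2
        · right; exact h2
        · left
          rcases h with h | h
          · omega
          · omega
      have hc1 : ((p : ℕ) : Int) + 1 = (((p+1) : ℕ) : Int) := by push_cast; ring
      have hfin : pvAddAll (if start ≤ ((pvRep dn p : ℕ) : Int)
            then PySem.Set.add inv ((pvRep dn p : ℕ) : Int) else inv)
            (pvIdeal start end_ dn hd (p+1))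
          = pvAddAll inv ((if start ≤ ((pvRep dn p : ℕ) : Int)
              then [((pvRep dn p : ℕ) : Int)] else []) ++ pvIdeal start end_ dn hd (p+1)) := by
        rw [pvAddAll_append]
        congr 1
        by_cases hst : start ≤ ((pvRep dn p : ℕ) : Int)
        · rw [if_pos hst, if_pos hst]; rfl
        · rw [if_neg hst, if_neg hst]; rfl
      by_cases hsh : ((p : ℕ) : Int) + 1 = (((10:ℕ) ^ pvDL p : ℕ) : Int)
      · rw [if_pos hsh]
        have hps : p + 1 = 10 ^ pvDL p := by exact_mod_cast hsh
        have hDL : pvDL (p+1) = pvDL p + 1 := by rw [pvDL_succ, if_pos hps]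
        have hc2 : (((10:ℕ) ^ pvDL p : ℕ) : Int) * 10 = (((10:ℕ) ^ pvDL (p+1) : ℕ) : Int) := by
          rw [hDL]; push_cast; ring
        have hx2 : 2 ≤ 10 ^ pvDL (p+1) := by
          have h1 := pvDL_pos (p+1)
          calc (2:ℕ) ≤ 10 ^ 1 := by norm_num
          _ ≤ 10 ^ pvDL (p+1) := Nat.pow_le_pow_right (by norm_num) h1
        rw [hc1, hc2, pv_floordiv_geom dn (10 ^ pvDL (p+1)) hx2, ih (p+1) _ hcond]
        exact hfin
      · rw [if_neg hsh]
        have hps : p + 1 ≠ 10 ^ pvDL p := by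
          intro hh
          exact hsh (by exact_mod_cast hh)
        have hDL : pvDL (p+1) = pvDL p := by rw [pvDL_succ, if_neg hps]
        have hc2 : (((10:ℕ) ^ pvDL p : ℕ) : Int) = (((10:ℕ) ^ pvDL (p+1) : ℕ) : Int) := by
          rw [hDL]
        have hc4 : ((pvGeom dn (10 ^ pvDL p) : ℕ) : Int)
            = ((pvGeom dn (10 ^ pvDL (p+1)) : ℕ) : Int) := by rw [hDL]
        rw [hc1, hc2, hc4, ih (p+1) _ hcond]
        exact hfin
    · next hle =>
      rfl

-- ===== outer fold =====

theorem pv_len_toStr (n : Int) :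
    PySem.Str.len (PySem.Int.toStr n) = ((PySem.Int.toChars n).length : Int) := by
  unfold PySem.Str.len
  rw [PySem.Int.toList_toStr]

theorem pv_body_eq (start end_ : Int) (hs : 0 ≤ start) (inv : PySem.Set Int) (d : Int)
    (hd2 : 2 ≤ d) :
    ((pv_top_nth start d).elim inv (fun t =>
        (pvIntOfChars? (pvRepeatStr d (PySem.Int.toChars t))).elim inv (fun n0 =>
          pvLoopA start end_ d inv n0 (end_ + 2).toNat)))
      = pvLoopB start end_ d inv 0 10
          (PySem.Int.floordiv (10 ^ d.toNat - 1) (10 - 1)) (end_ + 2).toNat := by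
  obtain ⟨dn, rfl⟩ : ∃ dn : ℕ, d = (dn : Int) := ⟨d.toNat, (Int.toNat_of_nonneg (by omega)).symm⟩
  have hdn : 2 ≤ dn := by exact_mod_cast hd2
  obtain ⟨sn, rfl⟩ : ∃ sn : ℕ, start = (sn : Int) := ⟨start.toNat, (Int.toNat_of_nonneg hs).symm⟩
  rw [pv_top_nth_eval sn dn hdn, Option.elim_some]
  rw [pvParse_repeat dn hdn (pvP0 sn dn), Option.elim_some]
  have hcondA : ((end_ + 1 - ((pvRep dn (pvP0 sn dn) : ℕ) : Int)).toNat < (end_ + 2).toNat ∨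
      end_ < ((pvRep dn (pvP0 sn dn) : ℕ) : Int)) := by
    rcases Int.lt_or_le end_ ((pvRep dn (pvP0 sn dn) : ℕ) : Int) with h2 | h2
    · right; exact h2
    · left; omega
  rw [pvLoopA_ideal (sn : Int) end_ dn hdn ((end_ + 2).toNat) (pvP0 sn dn) inv hcondA]
  have hskip : ∀ q < pvP0 sn dn, ((pvRep dn q : ℕ) : Int) < (sn : Int) := by
    intro q hq
    rcases Nat.eq_zero_or_pos sn with rfl | hsn
    · have hz : pvP0 0 dn = 0 := by unfold pvP0; exact Nat.zero_div _
      omega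
    · exact_mod_cast pvP0_lt_start hsn hdn hq
  rw [← pvIdeal_skip (hd := hdn) hskip]
  have hcondB : ((end_ + 1 - ((pvRep dn 0 : ℕ) : Int)).toNat < (end_ + 2).toNat ∨
      end_ < ((pvRep dn 0 : ℕ) : Int)) := by
    rw [pvRep_zero]
    simp only [Nat.cast_zero]
    omega
  have hB := pvLoopB_ideal (sn : Int) end_ dn hdn ((end_ + 2).toNat) 0 inv hcondB
  norm_num [pvDL] at hB
  have hmult : PySem.Int.floordiv (10 ^ ((dn : Int)).toNat - 1) (10 - 1)
      = ((pvGeom dn 10 : ℕ) : Int) := by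
    have h1 := pv_floordiv_geom dn 10 (by norm_num)
    push_cast at h1 ⊢
    simp only [Int.toNat_natCast]
    exact h1
  rw [hmult]
  exact hB.symm

theorem pv_fold_eq (start end_ : Int) (hs : 0 ≤ start) :
    ∀ (l : List Int), (∀ d ∈ l, 2 ≤ d) → ∀ (inv : PySem.Set Int),
      l.foldl (fun inv d =>
          (pv_top_nth start d).elim inv (fun t =>
            (pvIntOfChars? (pvRepeatStr d (PySem.Int.toChars t))).elim inv (fun n0 =>
              pvLoopA start end_ d inv n0 (end_ + 2).toNat))) inv
        = l.foldl (fun inv d =>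
            pvLoopB start end_ d inv 0 10
              (PySem.Int.floordiv (10 ^ d.toNat - 1) (10 - 1)) (end_ + 2).toNat) inv := by
  intro l
  induction l with
  | nil => intro _ inv; rfl
  | cons d t ih =>
    intro hmem inv
    simp only [List.foldl_cons]
    rw [pv_body_eq start end_ hs inv d (hmem d List.mem_cons_self)]
    exact ih (fun x hx => hmem x (List.mem_cons_of_mem d hx)) _

theorem invalid_ids_eq_alt (start end_ : Int) (hpre : Pre_invalid_ids start end_) :
    invalid_ids start end_ = invalid_ids_alt start end_ := by
  unfold invalid_ids invalid_ids_alt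
  rcases hpre with hs | ⟨he0, he9⟩
  · exact pv_fold_eq start end_ hs _
      (fun d hd => (PySem.List.mem_pyRange_one.mp hd).1) _
  · have hlen : PySem.Str.len (PySem.Int.toStr end_) = 1 := by
      rw [pv_len_toStr]
      obtain ⟨en, rfl⟩ : ∃ en : ℕ, end_ = (en : Int) :=
        ⟨end_.toNat, (Int.toNat_of_nonneg he0).symm⟩
      rw [pv_toChars_natCast, pv_toDigits_length]
      have h1 : pvDL en ≤ 1 := pvDL_le (by omega) (by exact_mod_cast by omega : en < 10 ^ 1)
      have h2 := pvDL_pos en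
      omega
    rw [hlen]
    have hr : PySem.List.pyRange 2 (1 + 1) 1 = [] := by
      rw [PySem.List.pyRange_one]
      norm_num
    rw [hr]
    rfl

-- ===== VERDICT (by name: the statement is the Claim_ definition above) =====
theorem invalid_ids_spec : Claim_equal_invalid_ids := by
  intro start end_ _ hpre
  unfold Spec_invalid_ids
  exact invalid_ids_eq_alt start end_ hpre
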